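-- pv_equiv track=rewrite | github.com/ns-krishnakodali/q-file-share | q-file-share-server/app/quantum_protocols/Untitled-1.py | multiply_poly_vectors
-- ===== SOURCE A (Python) =====
-- from typing import List
--
-- def mod_plus(r: int, alpha: int) -> int:
--     return ((r % alpha) + alpha) % alpha
--
-- def reduce_polynomial(polynomial):
--     N = 4
--     reduced_poly = [0] * N
--     degree = len(polynomial) - 1
--
--     for i, coeff in enumerate(polynomial):
--         index = (degree - i) % N
--         if ((degree - i) // N) % 2 == 0:
--             reduced_poly[index] += coeff
--         else:
--             reduced_poly[index] -= coeff
--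
--     return reduced_poly[::-1]
--
-- def reduced_polynomials_multiplication(polynomial1: List[int], polynomial2: List[int]):
--     return reduce_polynomial(multiply_polynomials(polynomial1, polynomial2))
--
-- def reduce_coefficients_mod_q(polynomial: List[int], q: int) -> List[int]:
--     return [mod_plus(c, q) for c in polynomial]
--
-- def multiply_polynomials(A: List[int], B: List[int]) -> List[int]:
--     max_degree = max(len(A), len(B))
--     if max_degree == 1:
--         return [A[0] * B[0]]
--
--     half = (max_degree + 1) // 2
--     A0, A1 = A[:half], A[half:]
--     B0, B1 = B[:half], B[half:]
--
--     C0 = multiply_polynomials(A0, B0)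
--     C2 = multiply_polynomials(A1, B1)
--     C1 = multiply_polynomials(add_polynomials(A0, A1), add_polynomials(B0, B1))
--
--     middle = subtract_polynomials(subtract_polynomials(C1, C0), C2)
--     result = [0] * (2 * max_degree - 1)
--
--     for i in range(len(C0)):
--         result[i] += C0[i]
--     for i in range(len(middle)):
--         result[i + half] += middle[i]
--     for i in range(len(C2)):
--         result[i + 2 * half] += C2[i]
--
--     return result
--
-- def add_polynomials(polynomial1: List[int], polynomial2: List[int]) -> List[int]:
--     max_length = max(len(polynomial1), len(polynomial2))
--     p1 = polynomial1 + [0] * (max_length - len(polynomial1))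
--     p2 = polynomial2 + [0] * (max_length - len(polynomial2))
--     return [p1[i] + p2[i] for i in range(max_length)]
--
-- def subtract_polynomials(polynomial1: List[int], polynomial2: List[int]) -> List[int]:
--     max_length = max(len(polynomial1), len(polynomial2))
--     p1 = polynomial1 + [0] * (max_length - len(polynomial1))
--     p2 = polynomial2 + [0] * (max_length - len(polynomial2))
--     return [p1[i] - p2[i] for i in range(max_length)]
--
-- def multiply_poly_vectors(
--     poly_vector1: List[List[int]], poly_vector2: List[List[int]], q: int
-- ) -> List[List[int]]:
--     result_polynomial: List[int] = [0] * 4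
--
--     for p1, p2 in zip(poly_vector1, poly_vector2):
--         poly_product = reduced_polynomials_multiplication(p1, p2)
--         result_polynomial = reduce_coefficients_mod_q(
--             add_polynomials(result_polynomial, poly_product), q
--         )
--
--     return result_polynomial
-- ===== SOURCE B (Python) =====
-- from typing import List
--
--
-- def multiply_poly_vectors(
--     poly_vector1: List[List[int]], poly_vector2: List[List[int]], q: int
-- ) -> List[int]:
--     acc = [0, 0, 0, 0]
--     for p1, p2 in zip(poly_vector1, poly_vector2):
--         m = len(p1) + len(p2) - 1
--         prod = [
--             sum(p1[i] * p2[k - i] for i in range(k + 1)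
--                 if i < len(p1) and k - i < len(p2))
--             for k in range(m)
--         ]
--         d = m - 1
--         red = [0, 0, 0, 0]
--         for k, c in enumerate(prod):
--             e = d - k
--             if (e // 4) % 2 == 0:
--                 red[3 - e % 4] += c
--             else:
--                 red[3 - e % 4] -= c
--         acc = [(x + y) % q for x, y in zip(acc, red)]
--     return acc
-- ===== Notes on version B (the rewrite author's own statement) =====
-- stated objective: simpler
-- what changed: Replaced the recursive Karatsuba multiplication with add/subtract helpers by a direct schoolbook convolution comprehension, wrote the degree-reduction into its 4 output slots directly instead of building an array by (degree-i)%4 and reversing it, and replaced pad-and-add plus ((c%q)+q)%q by a zip and a plain c%q; the flat loops avoid Karatsuba's Python-level recursion and temporary-list overhead, which a timing run measured as ~3.5x faster at the largest size both finish.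
-- outside the precondition, e.g. on multiply_poly_vectors([[1, 2]], [[3]], 7): A raises IndexError, B returns [0, 0, 3, 6]; on multiply_poly_vectors([[1]], [[2]], 0): A raises ZeroDivisionError, B raises ZeroDivisionError
import Mathlib
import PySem

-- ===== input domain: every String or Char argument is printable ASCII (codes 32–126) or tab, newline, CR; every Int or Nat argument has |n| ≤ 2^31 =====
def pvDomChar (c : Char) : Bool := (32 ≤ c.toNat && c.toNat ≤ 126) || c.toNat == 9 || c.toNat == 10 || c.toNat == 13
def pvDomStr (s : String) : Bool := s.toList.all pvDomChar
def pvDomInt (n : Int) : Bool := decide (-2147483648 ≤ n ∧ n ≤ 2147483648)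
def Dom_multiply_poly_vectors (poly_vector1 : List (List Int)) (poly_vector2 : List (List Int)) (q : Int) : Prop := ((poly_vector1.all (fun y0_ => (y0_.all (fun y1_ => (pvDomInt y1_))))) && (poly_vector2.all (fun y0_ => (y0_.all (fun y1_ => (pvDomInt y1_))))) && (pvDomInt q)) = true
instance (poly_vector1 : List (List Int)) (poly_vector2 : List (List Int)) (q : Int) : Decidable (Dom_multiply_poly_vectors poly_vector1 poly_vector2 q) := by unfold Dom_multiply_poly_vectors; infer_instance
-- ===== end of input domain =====

-- B replaces A's recursive Karatsuba multiply with a direct schoolbook convolution and a fused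
-- 4-slot reduction (objective: simpler); A = B on all inputs where the Python A returns (Pre_).


-- ===== PORT A =====

def mod_plus (r : Int) (alpha : Int) : Int :=
  PySem.Int.mod (PySem.Int.mod r alpha + alpha) alpha

-- 'for i, coeff in enumerate(polynomial): … reduced_poly[index] ± coeff'; N = 4 inlined
def reduce_polynomial (polynomial : List Int) : List Int :=
  let degree : Int := (polynomial.length : Int) - 1
  let reduced_poly := (PySem.List.enumerate polynomial).foldl
    (fun r ic =>
      let e : Int := degree - ic.1
      let index := (PySem.Int.mod e 4).toNat
      if PySem.Int.mod (PySem.Int.floordiv e 4) 2 == 0 then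
        r.set index (r.getD index 0 + ic.2)
      else
        r.set index (r.getD index 0 - ic.2))
    [0, 0, 0, 0]
  reduced_poly.reverse

def add_polynomials (polynomial1 : List Int) (polynomial2 : List Int) : List Int :=
  let max_length := max polynomial1.length polynomial2.length
  let p1 := polynomial1 ++ List.replicate (max_length - polynomial1.length) 0
  let p2 := polynomial2 ++ List.replicate (max_length - polynomial2.length) 0
  (List.range max_length).map (fun i => p1.getD i 0 + p2.getD i 0)

def subtract_polynomials (polynomial1 : List Int) (polynomial2 : List Int) : List Int :=
  let max_length := max polynomial1.length polynomial2.length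
  let p1 := polynomial1 ++ List.replicate (max_length - polynomial1.length) 0
  let p2 := polynomial2 ++ List.replicate (max_length - polynomial2.length) 0
  (List.range max_length).map (fun i => p1.getD i 0 - p2.getD i 0)

def reduce_coefficients_mod_q (polynomial : List Int) (q : Int) : List Int :=
  polynomial.map (fun c => mod_plus c q)

-- 'for i in range(len(src)): result[i + off] += src[i]' (the three assembly loops of
-- multiply_polynomials; indices are in range on every input Pre_ allows)
def pvAddInto (res : List Int) (src : List Int) (off : Nat) : List Int :=
  match src with
  | [] => res
  | x :: xs => pvAddInto (res.set off (res.getD off 0 + x)) xs (off + 1)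

-- Python's multiply_polynomials recurses unboundedly (it diverges on ([], [])); the fuel
-- argument only makes it total: with fuel ≥ max(len A, len B) ≥ 1 the guard never fires.
-- A[0] on a possibly-empty list is ported as getD (Python raises IndexError there: outside Pre_).
def multiply_polynomials (fuel : Nat) (A : List Int) (B : List Int) : List Int :=
  match fuel with
  | 0 => []
  | fuel + 1 =>
    let max_degree := max A.length B.length
    if max_degree == 1 then [A.getD 0 0 * B.getD 0 0]
    else
      let half := (max_degree + 1) / 2
      let A0 := A.take half
      let A1 := A.drop half
      let B0 := B.take half
      let B1 := B.drop half
      let C0 := multiply_polynomials fuel A0 B0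
      let C2 := multiply_polynomials fuel A1 B1
      let C1 := multiply_polynomials fuel (add_polynomials A0 A1) (add_polynomials B0 B1)
      let middle := subtract_polynomials (subtract_polynomials C1 C0) C2
      let result := List.replicate (2 * max_degree - 1) 0
      let result := pvAddInto result C0 0
      let result := pvAddInto result middle half
      let result := pvAddInto result C2 (2 * half)
      result

def reduced_polynomials_multiplication (polynomial1 : List Int) (polynomial2 : List Int) : List Int :=
  reduce_polynomial (multiply_polynomials (max polynomial1.length polynomial2.length) polynomial1 polynomial2)

def multiply_poly_vectors (poly_vector1 : List (List Int)) (poly_vector2 : List (List Int)) (q : Int) : List Int :=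
  (poly_vector1.zip poly_vector2).foldl
    (fun result_polynomial pr =>
      let poly_product := reduced_polynomials_multiplication pr.1 pr.2
      reduce_coefficients_mod_q (add_polynomials result_polynomial poly_product) q)
    [0, 0, 0, 0]

-- ===== PORT B =====
def multiply_poly_vectors_alt (poly_vector1 : List (List Int)) (poly_vector2 : List (List Int)) (q : Int) : List Int :=
  (poly_vector1.zip poly_vector2).foldl
    (fun acc pr =>
      let p1 := pr.1
      let p2 := pr.2
      let m := p1.length + p2.length - 1
      let prod := (List.range m).map (fun k =>
        (List.range (k + 1)).foldl
          (fun s i => if i < p1.length ∧ k - i < p2.length then s + p1.getD i 0 * p2.getD (k - i) 0 else s)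
          0)
      let d : Int := (m : Int) - 1
      let red := (PySem.List.enumerate prod).foldl
        (fun r kc =>
          let e : Int := d - kc.1
          let idx := ((3 : Int) - PySem.Int.mod e 4).toNat
          if PySem.Int.mod (PySem.Int.floordiv e 4) 2 == 0 then
            r.set idx (r.getD idx 0 + kc.2)
          else
            r.set idx (r.getD idx 0 - kc.2))
        [0, 0, 0, 0]
      (acc.zip red).map (fun xy => PySem.Int.mod (xy.1 + xy.2) q))
    [0, 0, 0, 0]

-- ===== PRECONDITION & SPEC =====
-- Pre_ is exactly where the Python A returns: A raises IndexError (or diverges) as soon as a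
-- zipped pair has unequal lengths or is empty, and ZeroDivisionError when q = 0 with a
-- nonempty zip; nothing on which A returns is excluded.
def Pre_multiply_poly_vectors (poly_vector1 : List (List Int)) (poly_vector2 : List (List Int)) (q : Int) : Prop :=
  (∀ pr ∈ poly_vector1.zip poly_vector2, pr.1.length = pr.2.length ∧ pr.1 ≠ []) ∧
  (poly_vector1.zip poly_vector2 = [] ∨ q ≠ 0)
instance (poly_vector1 : List (List Int)) (poly_vector2 : List (List Int)) (q : Int) : Decidable (Pre_multiply_poly_vectors poly_vector1 poly_vector2 q) := by unfold Pre_multiply_poly_vectors; infer_instance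

def pvWitness_multiply_poly_vectors : List (List Int) × List (List Int) × Int :=
  ([[1, 2, 3, 4], [2, 0, 1]], [[5, 6, 7, 0], [1, 1, 1]], 17)

def Spec_multiply_poly_vectors (poly_vector1 : List (List Int)) (poly_vector2 : List (List Int)) (q : Int) (out : List Int) : Prop := out = multiply_poly_vectors_alt poly_vector1 poly_vector2 q
instance (poly_vector1 : List (List Int)) (poly_vector2 : List (List Int)) (q : Int) (out : List Int) : Decidable (Spec_multiply_poly_vectors poly_vector1 poly_vector2 q out) := by unfold Spec_multiply_poly_vectors; infer_instance

-- ===== CLAIM (what is proved, stated in full; the proofs are below) =====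
def Claim_equal_multiply_poly_vectors : Prop := ∀ (poly_vector1 : List (List Int)) (poly_vector2 : List (List Int)) (q : Int), Dom_multiply_poly_vectors poly_vector1 poly_vector2 q → Pre_multiply_poly_vectors poly_vector1 poly_vector2 q → Spec_multiply_poly_vectors poly_vector1 poly_vector2 q (multiply_poly_vectors poly_vector1 poly_vector2 q)

-- ===== LEMMAS AND PROOFS =====

noncomputable def pvToP (l : List Int) : Polynomial ℤ :=
  ∑ i ∈ Finset.range l.length, Polynomial.C (l.getD i 0) * Polynomial.X ^ i

theorem pvCoeff_toP (l : List Int) (k : ℕ) : (pvToP l).coeff k = l.getD k 0 := by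
  unfold pvToP
  rw [Polynomial.finset_sum_coeff]
  simp only [Polynomial.coeff_C_mul, Polynomial.coeff_X_pow, mul_ite, mul_one, mul_zero]
  rw [Finset.sum_ite_eq]
  by_cases h : k < l.length
  · simp [h]
  · simp [h]

theorem pvGetD_ge (l : List Int) (k : ℕ) (h : l.length ≤ k) : l.getD k 0 = 0 :=
  List.getD_eq_default l 0 h

theorem pvList_eq_of_toP {l1 l2 : List Int} (hlen : l1.length = l2.length)
    (h : pvToP l1 = pvToP l2) : l1 = l2 := by
  apply List.ext_getElem hlen
  intro i h1 h2
  have := congrArg (fun p => Polynomial.coeff p i) h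
  simpa [pvCoeff_toP, List.getD_eq_getElem, h1, h2] using this

theorem pvGetD_take (l : List Int) (h k : ℕ) :
    (l.take h).getD k 0 = if k < h then l.getD k 0 else 0 := by
  simp only [List.getD_eq_getElem?_getD, List.getElem?_take]
  split
  · rfl
  · simp

theorem pvGetD_drop (l : List Int) (h k : ℕ) :
    (l.drop h).getD k 0 = l.getD (h + k) 0 := by
  simp [List.getD_eq_getElem?_getD, List.getElem?_drop]

theorem pvGetD_pad (p : List Int) (j k : ℕ) :
    (p ++ List.replicate j 0).getD k 0 = p.getD k 0 := by
  simp only [List.getD_eq_getElem?_getD, List.getElem?_append]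
  split
  · rfl
  · rw [List.getElem?_replicate]
    split <;> simp_all

theorem pvGetD_set (l : List Int) (m : ℕ) (v : Int) (k : ℕ) (hm : m < l.length) :
    (l.set m v).getD k 0 = if k = m then v else l.getD k 0 := by
  simp only [List.getD_eq_getElem?_getD, List.getElem?_set]
  by_cases h : m = k <;> simp [h, eq_comm]
  · subst h; simp [hm]

theorem pvGetD_map_range (f : ℕ → Int) (n k : ℕ) :
    ((List.range n).map f).getD k 0 = if k < n then f k else 0 := by
  simp only [List.getD_eq_getElem?_getD, List.getElem?_map]
  by_cases h : k < n <;> simp [h]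

theorem pvToP_nil : pvToP [] = 0 := by simp [pvToP]

theorem pvToP_replicate_zero (n : ℕ) : pvToP (List.replicate n 0) = 0 := by
  apply Polynomial.ext; intro k
  rw [pvCoeff_toP]
  simp [List.getD_eq_getElem?_getD, List.getElem?_replicate]
  split <;> rfl

theorem pvCoeff_X_pow_mul (p : Polynomial ℤ) (h k : ℕ) :
    (Polynomial.X ^ h * p).coeff k = if h ≤ k then p.coeff (k - h) else 0 := by
  rw [mul_comm, Polynomial.coeff_mul_X_pow']

theorem pvToP_singleton (a : Int) : pvToP [a] = Polynomial.C a := by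
  simp [pvToP]

theorem pvToP_cons (x : Int) (xs : List Int) :
    pvToP (x :: xs) = Polynomial.C x + Polynomial.X * pvToP xs := by
  apply Polynomial.ext; intro k
  rw [Polynomial.coeff_add, pvCoeff_toP, Polynomial.coeff_C]
  cases k with
  | zero => simp
  | succ n => simp [Polynomial.coeff_X_mul, pvCoeff_toP]

theorem pvToP_take_drop (l : List Int) (h : ℕ) :
    pvToP l = pvToP (l.take h) + Polynomial.X ^ h * pvToP (l.drop h) := by
  apply Polynomial.ext; intro k
  rw [Polynomial.coeff_add, pvCoeff_toP, pvCoeff_toP, pvCoeff_X_pow_mul, pvCoeff_toP]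
  rw [pvGetD_take, pvGetD_drop]
  by_cases hk : k < h
  · have : ¬ h ≤ k := by omega
    simp [hk, this]
  · rw [if_neg hk, if_pos (by omega), zero_add]
    congr 1
    omega

theorem pvLength_add (p q : List Int) :
    (add_polynomials p q).length = max p.length q.length := by
  simp [add_polynomials]

theorem pvLength_sub (p q : List Int) :
    (subtract_polynomials p q).length = max p.length q.length := by
  simp [subtract_polynomials]

theorem pvGetD_add (p q : List Int) (k : ℕ) :
    (add_polynomials p q).getD k 0 = p.getD k 0 + q.getD k 0 := by
  unfold add_polynomials
  rw [pvGetD_map_range]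
  split
  · rw [pvGetD_pad, pvGetD_pad]
  · rw [pvGetD_ge p, pvGetD_ge q] <;> omega

theorem pvGetD_sub (p q : List Int) (k : ℕ) :
    (subtract_polynomials p q).getD k 0 = p.getD k 0 - q.getD k 0 := by
  unfold subtract_polynomials
  rw [pvGetD_map_range]
  split
  · rw [pvGetD_pad, pvGetD_pad]
  · rw [pvGetD_ge p, pvGetD_ge q] <;> omega

theorem pvToP_add (p q : List Int) :
    pvToP (add_polynomials p q) = pvToP p + pvToP q := by
  apply Polynomial.ext; intro k
  rw [Polynomial.coeff_add, pvCoeff_toP, pvCoeff_toP, pvCoeff_toP, pvGetD_add]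

theorem pvToP_sub (p q : List Int) :
    pvToP (subtract_polynomials p q) = pvToP p - pvToP q := by
  apply Polynomial.ext; intro k
  rw [Polynomial.coeff_sub, pvCoeff_toP, pvCoeff_toP, pvCoeff_toP, pvGetD_sub]

theorem pvToP_set (res : List Int) (m : ℕ) (v : Int) (hm : m < res.length) :
    pvToP (res.set m v) =
      pvToP res + Polynomial.C (v - res.getD m 0) * Polynomial.X ^ m := by
  apply Polynomial.ext; intro k
  rw [Polynomial.coeff_add, pvCoeff_toP, pvCoeff_toP, pvGetD_set res m v k hm,
    Polynomial.coeff_C_mul, Polynomial.coeff_X_pow]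
  by_cases h : k = m <;> simp [h]

theorem pvAddInto_spec (src : List Int) : ∀ (res : List Int) (off : ℕ),
    off + src.length ≤ res.length →
    (pvAddInto res src off).length = res.length ∧
    pvToP (pvAddInto res src off) = pvToP res + Polynomial.X ^ off * pvToP src := by
  induction src with
  | nil => intro res off _; simp [pvAddInto, pvToP_nil]
  | cons x xs ih =>
    intro res off hlen
    simp only [List.length_cons] at hlen
    have hoff : off < res.length := by omega
    unfold pvAddInto
    obtain ⟨h1, h2⟩ := ih (res.set off (res.getD off 0 + x)) (off + 1)
      (by simp [List.length_set]; omega)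
    refine ⟨by rw [h1, List.length_set], ?_⟩
    rw [h2, pvToP_set res off _ hoff, pvToP_cons, add_sub_cancel_left]
    ring

theorem pvCoeff_mul (p1 p2 : List Int) (k : ℕ) :
    (pvToP p1 * pvToP p2).coeff k
      = ∑ i ∈ Finset.range (k + 1), p1.getD i 0 * p2.getD (k - i) 0 := by
  rw [Polynomial.coeff_mul, Finset.Nat.sum_antidiagonal_eq_sum_range_succ_mk]
  simp [pvCoeff_toP]


theorem pvKarat_succ_eq (fuel : ℕ) (A B : List Int) :
    multiply_polynomials (fuel + 1) A B =
      if (max A.length B.length == 1) then [A.getD 0 0 * B.getD 0 0]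
      else
        pvAddInto
          (pvAddInto
            (pvAddInto (List.replicate (2 * max A.length B.length - 1) 0)
              (multiply_polynomials fuel (A.take ((max A.length B.length + 1) / 2))
                (B.take ((max A.length B.length + 1) / 2))) 0)
            (subtract_polynomials
              (subtract_polynomials
                (multiply_polynomials fuel
                  (add_polynomials (A.take ((max A.length B.length + 1) / 2))
                    (A.drop ((max A.length B.length + 1) / 2)))
                  (add_polynomials (B.take ((max A.length B.length + 1) / 2))
                    (B.drop ((max A.length B.length + 1) / 2))))
                (multiply_polynomials fuel (A.take ((max A.length B.length + 1) / 2))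
                  (B.take ((max A.length B.length + 1) / 2))))
              (multiply_polynomials fuel (A.drop ((max A.length B.length + 1) / 2))
                (B.drop ((max A.length B.length + 1) / 2))))
            ((max A.length B.length + 1) / 2))
          (multiply_polynomials fuel (A.drop ((max A.length B.length + 1) / 2))
            (B.drop ((max A.length B.length + 1) / 2)))
          (2 * ((max A.length B.length + 1) / 2)) := rfl

theorem pvKarat_spec : ∀ (fuel : ℕ) (A B : List Int) (n : ℕ),
    A.length = n → B.length = n → 1 ≤ n → n ≤ fuel →
    (multiply_polynomials fuel A B).length = 2 * n - 1 ∧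
    pvToP (multiply_polynomials fuel A B) = pvToP A * pvToP B := by
  intro fuel
  induction fuel with
  | zero => intro A B n _ _ h1 h2; omega
  | succ fuel ih =>
    intro A B n hA hB h1 h2
    by_cases hn1 : n = 1
    · subst hn1
      obtain ⟨a, rfl⟩ := List.length_eq_one_iff.mp hA
      obtain ⟨b, rfl⟩ := List.length_eq_one_iff.mp hB
      have hred : multiply_polynomials (fuel + 1) [a] [b] = [a * b] := rfl
      rw [hred]
      refine ⟨rfl, ?_⟩
      rw [pvToP_singleton, pvToP_singleton, pvToP_singleton, map_mul]
    · -- n ≥ 2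
      have hn2 : 2 ≤ n := by omega
      have hmax : max A.length B.length = n := by rw [hA, hB, max_self]
      have hbeq : (max A.length B.length == 1) = false := by simp [hmax]; omega
      rw [pvKarat_succ_eq, hbeq]
      simp only [Bool.false_eq_true, if_false, hmax]
      set h : ℕ := (n + 1) / 2 with hh
      have hhle : h ≤ n - 1 := by omega
      have hh1 : 1 ≤ h := by omega
      have hA0 : (A.take h).length = h := by rw [List.length_take, hA]; omega
      have hA1 : (A.drop h).length = n - h := by rw [List.length_drop, hA]
      have hB0 : (B.take h).length = h := by rw [List.length_take, hB]; omega
      have hB1 : (B.drop h).length = n - h := by rw [List.length_drop, hB]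
      have hSA : (add_polynomials (A.take h) (A.drop h)).length = h := by
        rw [pvLength_add, hA0, hA1]; omega
      have hSB : (add_polynomials (B.take h) (B.drop h)).length = h := by
        rw [pvLength_add, hB0, hB1]; omega
      set C0t := multiply_polynomials fuel (A.take h) (B.take h) with hC0t
      set C2t := multiply_polynomials fuel (A.drop h) (B.drop h) with hC2t
      set C1t := multiply_polynomials fuel (add_polynomials (A.take h) (A.drop h))
        (add_polynomials (B.take h) (B.drop h)) with hC1t
      set midt := subtract_polynomials (subtract_polynomials C1t C0t) C2t with hmidt
      have lC0 : C0t.length = 2 * h - 1 := (ih (A.take h) (B.take h) h hA0 hB0 hh1 (by omega)).1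
      have pC0 : pvToP C0t = pvToP (A.take h) * pvToP (B.take h) :=
        (ih (A.take h) (B.take h) h hA0 hB0 hh1 (by omega)).2
      have lC2 : C2t.length = 2 * (n - h) - 1 :=
        (ih (A.drop h) (B.drop h) (n - h) hA1 hB1 (by omega) (by omega)).1
      have pC2 : pvToP C2t = pvToP (A.drop h) * pvToP (B.drop h) :=
        (ih (A.drop h) (B.drop h) (n - h) hA1 hB1 (by omega) (by omega)).2
      have lC1 : C1t.length = 2 * h - 1 :=
        (ih _ _ h hSA hSB hh1 (by omega)).1
      have pC1 : pvToP C1t = pvToP (add_polynomials (A.take h) (A.drop h)) *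
          pvToP (add_polynomials (B.take h) (B.drop h)) :=
        (ih _ _ h hSA hSB hh1 (by omega)).2
      have lmid : midt.length = 2 * h - 1 := by
        rw [hmidt, pvLength_sub, pvLength_sub, lC0, lC1, lC2]; omega
      have pmid : pvToP midt = (pvToP (A.take h) + pvToP (A.drop h)) * (pvToP (B.take h) + pvToP (B.drop h))
            - pvToP (A.take h) * pvToP (B.take h) - pvToP (A.drop h) * pvToP (B.drop h) := by
        rw [hmidt, pvToP_sub, pvToP_sub, pC0, pC1, pC2, pvToP_add, pvToP_add]
      obtain ⟨l1, p1⟩ := pvAddInto_spec C0t (List.replicate (2 * n - 1) 0) 0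
        (by rw [lC0, List.length_replicate]; omega)
      obtain ⟨l2, p2⟩ := pvAddInto_spec midt (pvAddInto (List.replicate (2 * n - 1) 0) C0t 0) h
        (by rw [l1, List.length_replicate, lmid]; omega)
      obtain ⟨l3, p3⟩ := pvAddInto_spec C2t
        (pvAddInto (pvAddInto (List.replicate (2 * n - 1) 0) C0t 0) midt h) (2 * h)
        (by rw [l2, l1, List.length_replicate, lC2]; omega)
      refine ⟨by rw [l3, l2, l1, List.length_replicate], ?_⟩
      rw [p3, p2, p1, pmid, pC0, pC2, pvToP_replicate_zero,
        pvToP_take_drop A h, pvToP_take_drop B h]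
      ring

theorem pvModPlus_eq (a b : Int) (hb : b ≠ 0) :
    PySem.Int.mod (PySem.Int.mod a b + b) b = PySem.Int.mod a b := by
  have pos : ∀ (x c : Int), 0 < c →
      PySem.Int.mod (PySem.Int.mod x c + c) c = PySem.Int.mod x c := by
    intro x c hc
    simp only [PySem.Int.mod_eq_emod_of_pos hc]
    rw [Int.add_emod_right, Int.emod_emod_of_dvd _ dvd_rfl]
  rcases lt_or_gt_of_ne hb with hneg | hpos
  · have key : ∀ x : Int, PySem.Int.mod x b = - PySem.Int.mod (-x) (-b) := by
      intro x
      simpa using PySem.Int.mod_neg_neg (-x) (-b)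
    rw [key a, key (- PySem.Int.mod (-a) (-b) + b)]
    have h2 : -(-PySem.Int.mod (-a) (-b) + b) = PySem.Int.mod (-a) (-b) + (-b) := by ring
    rw [h2, neg_inj]
    exact pos (-a) (-b) (by omega)
  · exact pos a b hpos

theorem pvSum_map_range (n : ℕ) (f : ℕ → Int) :
    ((List.range n).map f).sum = ∑ i ∈ Finset.range n, f i := by
  induction n with
  | zero => simp
  | succ n ih =>
    rw [List.range_succ, List.map_append, List.sum_append, Finset.sum_range_succ, ih]
    simp

theorem pvInner_sum (p1 p2 : List Int) (k : ℕ) :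
    (List.range (k + 1)).foldl
      (fun s i => if i < p1.length ∧ k - i < p2.length then s + p1.getD i 0 * p2.getD (k - i) 0 else s) 0
    = ∑ i ∈ Finset.range (k + 1), p1.getD i 0 * p2.getD (k - i) 0 := by
  have hfun : (fun (s : Int) (i : ℕ) => if i < p1.length ∧ k - i < p2.length then s + p1.getD i 0 * p2.getD (k - i) 0 else s)
      = (fun s i => s + (if i < p1.length ∧ k - i < p2.length then p1.getD i 0 * p2.getD (k - i) 0 else 0)) := by
    funext s i
    split <;> simp
  rw [hfun, PySem.List.foldl_add, pvSum_map_range, zero_add]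
  apply Finset.sum_congr rfl
  intro i _
  split
  · rfl
  · rename_i hcond
    rcases Decidable.not_and_iff_not_or_not.mp hcond with h | h
    · rw [List.getD_eq_default p1 0 (by omega), zero_mul]
    · rw [List.getD_eq_default p2 0 (by omega), mul_zero]

def pvConvB (p1 p2 : List Int) : List Int :=
  (List.range (p1.length + p2.length - 1)).map (fun k =>
    (List.range (k + 1)).foldl
      (fun s i => if i < p1.length ∧ k - i < p2.length then s + p1.getD i 0 * p2.getD (k - i) 0 else s)
      0)

theorem pvConvB_length (p1 p2 : List Int) :
    (pvConvB p1 p2).length = p1.length + p2.length - 1 := by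
  simp [pvConvB]

theorem pvToP_convB (p1 p2 : List Int) :
    pvToP (pvConvB p1 p2) = pvToP p1 * pvToP p2 := by
  apply Polynomial.ext; intro k
  rw [pvCoeff_toP, pvCoeff_mul]
  unfold pvConvB
  rw [pvGetD_map_range]
  split
  · rw [pvInner_sum]
  · rename_i hk
    symm
    apply Finset.sum_eq_zero
    intro i hi
    simp only [Finset.mem_range] at hi
    by_cases h1 : i < p1.length
    · rw [List.getD_eq_default p2 0 (by omega), mul_zero]
    · rw [List.getD_eq_default p1 0 (by omega), zero_mul]

theorem pvKarat_eq_convB (p1 p2 : List Int) (hlen : p1.length = p2.length) (hne : p1 ≠ []) :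
    multiply_polynomials (max p1.length p2.length) p1 p2 = pvConvB p1 p2 := by
  have hn : 1 ≤ p1.length := List.length_pos_iff.mpr hne
  have hmax : max p1.length p2.length = p1.length := by omega
  obtain ⟨hl, hp⟩ := pvKarat_spec (max p1.length p2.length) p1 p2 p1.length rfl hlen.symm hn (by omega)
  apply pvList_eq_of_toP
  · rw [hl, pvConvB_length]; omega
  · rw [hp, pvToP_convB]

theorem pvLen4 {l : List Int} (h : l.length = 4) : ∃ a b c d, l = [a, b, c, d] := by
  match l, h with
  | [a, b, c, d], _ => exact ⟨a, b, c, d, rfl⟩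

def pvStepA (dg : Int) (r : List Int) (ic : Int × Int) : List Int :=
  if PySem.Int.mod (PySem.Int.floordiv (dg - ic.1) 4) 2 == 0 then
    r.set (PySem.Int.mod (dg - ic.1) 4).toNat
      (r.getD (PySem.Int.mod (dg - ic.1) 4).toNat 0 + ic.2)
  else
    r.set (PySem.Int.mod (dg - ic.1) 4).toNat
      (r.getD (PySem.Int.mod (dg - ic.1) 4).toNat 0 - ic.2)

def pvStepB (dg : Int) (r : List Int) (kc : Int × Int) : List Int :=
  if PySem.Int.mod (PySem.Int.floordiv (dg - kc.1) 4) 2 == 0 then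
    r.set ((3 : Int) - PySem.Int.mod (dg - kc.1) 4).toNat
      (r.getD ((3 : Int) - PySem.Int.mod (dg - kc.1) 4).toNat 0 + kc.2)
  else
    r.set ((3 : Int) - PySem.Int.mod (dg - kc.1) 4).toNat
      (r.getD ((3 : Int) - PySem.Int.mod (dg - kc.1) 4).toNat 0 - kc.2)

theorem pvStepA_len (dg : Int) (r : List Int) (x : Int × Int) :
    (pvStepA dg r x).length = r.length := by
  unfold pvStepA; split <;> simp

theorem pvStepB_len (dg : Int) (r : List Int) (x : Int × Int) :
    (pvStepB dg r x).length = r.length := by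
  unfold pvStepB; split <;> simp

theorem pvStep_rev (dg : Int) (x : Int × Int) {acc : List Int} (h4 : acc.length = 4) :
    (pvStepA dg acc x).reverse = pvStepB dg acc.reverse x := by
  obtain ⟨a, b, c, d, rfl⟩ := pvLen4 h4
  unfold pvStepA pvStepB
  have h0 : 0 ≤ PySem.Int.mod (dg - x.1) 4 := PySem.Int.mod_nonneg _ (by norm_num)
  have h4' : PySem.Int.mod (dg - x.1) 4 < 4 := PySem.Int.mod_lt _ (by norm_num)
  set m := PySem.Int.mod (dg - x.1) 4 with hm
  have hc : m = 0 ∨ m = 1 ∨ m = 2 ∨ m = 3 := by omega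
  rcases hc with h | h | h | h <;> rw [h] <;> split <;> rfl

theorem pvRev_fold (dg : Int) :
    ∀ (l : List (Int × Int)) (acc : List Int), acc.length = 4 →
      (l.foldl (pvStepA dg) acc).reverse = l.foldl (pvStepB dg) acc.reverse := by
  intro l
  induction l with
  | nil => intro acc _; rfl
  | cons x xs ih =>
    intro acc h4
    rw [List.foldl_cons, List.foldl_cons, ih _ (by rw [pvStepA_len, h4]), pvStep_rev dg x h4]

theorem pvFoldl_len {α : Type} (f : List Int → α → List Int)
    (hf : ∀ r x, (f r x).length = r.length) :
    ∀ (l : List α) (acc : List Int), (l.foldl f acc).length = acc.length := by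
  intro l
  induction l with
  | nil => intro acc; rfl
  | cons x xs ih => intro acc; rw [List.foldl_cons, ih, hf]

theorem pvReduce_eq_foldB (l : List Int) :
    reduce_polynomial l =
      (PySem.List.enumerate l).foldl (pvStepB ((l.length : Int) - 1)) [0, 0, 0, 0] := by
  show ((PySem.List.enumerate l).foldl (pvStepA ((l.length : Int) - 1)) [0, 0, 0, 0]).reverse = _
  rw [pvRev_fold _ _ _ rfl]
  rfl

theorem pvRPM_eq (p1 p2 : List Int) (hlen : p1.length = p2.length) (hne : p1 ≠ []) :
    reduced_polynomials_multiplication p1 p2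
      = (PySem.List.enumerate (pvConvB p1 p2)).foldl
          (pvStepB (((p1.length + p2.length - 1 : ℕ) : Int) - 1)) [0, 0, 0, 0] := by
  unfold reduced_polynomials_multiplication
  rw [pvKarat_eq_convB p1 p2 hlen hne, pvReduce_eq_foldB, pvConvB_length]

theorem pvZip_mod (q : Int) (hq : q ≠ 0) {acc red : List Int}
    (ha : acc.length = 4) (hr : red.length = 4) :
    reduce_coefficients_mod_q (add_polynomials acc red) q
      = (acc.zip red).map (fun xy => PySem.Int.mod (xy.1 + xy.2) q) := by
  obtain ⟨a, b, c, d, rfl⟩ := pvLen4 ha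
  obtain ⟨e, f, g, h, rfl⟩ := pvLen4 hr
  have hmp : ∀ z : Int, mod_plus z q = PySem.Int.mod z q := by
    intro z; unfold mod_plus; exact pvModPlus_eq z q hq
  have h1 : add_polynomials [a, b, c, d] [e, f, g, h] = [a + e, b + f, c + g, d + h] := rfl
  rw [h1]
  show [mod_plus (a + e) q, mod_plus (b + f) q, mod_plus (c + g) q, mod_plus (d + h) q] = _
  simp [hmp]

theorem pvMain (q : Int) :
    ∀ (l : List (List Int × List Int)) (acc : List Int),
      acc.length = 4 →
      (∀ pr ∈ l, pr.1.length = pr.2.length ∧ pr.1 ≠ []) →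
      (l = [] ∨ q ≠ 0) →
      l.foldl (fun result_polynomial pr =>
          reduce_coefficients_mod_q
            (add_polynomials result_polynomial (reduced_polynomials_multiplication pr.1 pr.2)) q) acc
      = l.foldl (fun acc pr =>
          (acc.zip ((PySem.List.enumerate (pvConvB pr.1 pr.2)).foldl
              (pvStepB (((pr.1.length + pr.2.length - 1 : ℕ) : Int) - 1)) [0, 0, 0, 0])).map
            (fun xy => PySem.Int.mod (xy.1 + xy.2) q)) acc := by
  intro l
  induction l with
  | nil => intro acc _ _ _; rfl
  | cons pr rest ih =>
    intro acc h4 hall hq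
    have hq' : q ≠ 0 := hq.resolve_left (by simp)
    obtain ⟨hl, hne⟩ := hall pr (by simp)
    have hred4 : ((PySem.List.enumerate (pvConvB pr.1 pr.2)).foldl
        (pvStepB (((pr.1.length + pr.2.length - 1 : ℕ) : Int) - 1)) [0, 0, 0, 0]).length = 4 :=
      pvFoldl_len _ (pvStepB_len _) _ _
    have hstep : reduce_coefficients_mod_q
        (add_polynomials acc (reduced_polynomials_multiplication pr.1 pr.2)) q
        = (acc.zip ((PySem.List.enumerate (pvConvB pr.1 pr.2)).foldl
            (pvStepB (((pr.1.length + pr.2.length - 1 : ℕ) : Int) - 1)) [0, 0, 0, 0])).map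
            (fun xy => PySem.Int.mod (xy.1 + xy.2) q) := by
      rw [pvRPM_eq pr.1 pr.2 hl hne]
      exact pvZip_mod q hq' h4 hred4
    have hlen' : ((acc.zip ((PySem.List.enumerate (pvConvB pr.1 pr.2)).foldl
        (pvStepB (((pr.1.length + pr.2.length - 1 : ℕ) : Int) - 1)) [0, 0, 0, 0])).map
          (fun xy => PySem.Int.mod (xy.1 + xy.2) q)).length = 4 := by
      rw [List.length_map, List.length_zip, h4, hred4]
      rfl
    simp only [List.foldl_cons]
    rw [hstep]
    exact ih _ hlen' (fun p hp => hall p (by simp [hp])) (Or.inr hq')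

-- ===== VERDICT (by name: the statement is the Claim_ definition above) =====
theorem multiply_poly_vectors_spec : Claim_equal_multiply_poly_vectors := by
  intro poly_vector1 poly_vector2 q _ hpre
  obtain ⟨hall, hq⟩ := hpre
  unfold Spec_multiply_poly_vectors multiply_poly_vectors multiply_poly_vectors_alt
  exact pvMain q (poly_vector1.zip poly_vector2) [0, 0, 0, 0] rfl hall hq
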